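-- pv_equiv track=rewrite | github.com/nikitcha/ceebios-pdfdoi | backend/ml.py | title_from_tokens
-- ===== SOURCE A (Python) =====
-- def title_from_tokens(tokens):
--     titles, this = [],[]
--     for token in tokens:
--         if 'title' in token['class']:
--             this.append(token['text'])
--         if 'e-' in token['class']:
--             titles.append(this)
--             this = []
--     return titles
-- ===== SOURCE B (Python) =====
-- def title_from_tokens(tokens):
--     # Boundary-first decomposition: find all segment-ending token indices,
--     # then carve the token list into slices and map each slice independently.
--     bounds = [i for i, t in enumerate(tokens) if 'e-' in t['class']]
--     titles = []
--     start = 0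
--     for b in bounds:
--         titles.append([t['text'] for t in tokens[start:b + 1] if 'title' in t['class']])
--         start = b + 1
--     return titles
-- ===== Notes on version B (the rewrite author's own statement) =====
-- stated objective: alternative
-- what changed: Replaces A's single accumulate-and-flush loop by a two-phase decomposition: first collect the indices of all segment-ending tokens ('e-' in class), then slice the token list at those boundaries and build each segment's title texts independently with a comprehension; the trailing run after the last boundary is never materialised.
import Mathlib
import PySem

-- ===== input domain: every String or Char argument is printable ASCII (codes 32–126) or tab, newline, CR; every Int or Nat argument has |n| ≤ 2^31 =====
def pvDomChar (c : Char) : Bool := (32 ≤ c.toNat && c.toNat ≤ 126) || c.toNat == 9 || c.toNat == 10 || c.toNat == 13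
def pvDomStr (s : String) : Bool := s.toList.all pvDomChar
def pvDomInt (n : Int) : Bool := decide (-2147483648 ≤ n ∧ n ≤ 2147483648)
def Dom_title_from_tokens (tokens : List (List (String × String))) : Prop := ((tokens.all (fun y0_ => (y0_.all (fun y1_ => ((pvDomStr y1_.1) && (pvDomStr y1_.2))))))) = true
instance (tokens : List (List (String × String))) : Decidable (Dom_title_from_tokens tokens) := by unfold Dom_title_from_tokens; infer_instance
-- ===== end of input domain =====

-- B replaces A's accumulate-and-flush loop by a two-phase decomposition (boundary indices first, then independent slices); same cost, alternative structure.


-- shared accessor helpers: token['class'] / token['text'] (total via getD; Pre_ restricts to tokens where the key is present) and the two membership tests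
def tokCls (t : List (String × String)) : String := (PySem.Dict.mk t).getD "class" ""
def tokText (t : List (String × String)) : String := (PySem.Dict.mk t).getD "text" ""
def isTitle (t : List (String × String)) : Bool := PySem.Str.isIn "title" (tokCls t)
def isEnd (t : List (String × String)) : Bool := PySem.Str.isIn "e-" (tokCls t)

-- ===== PORT A =====
def title_from_tokens (tokens : List (List (String × String))) : List (List String) :=
  (tokens.foldl
    (fun (st : List (List String) × List String) token =>
      let this := if isTitle token then st.2 ++ [tokText token] else st.2
      if isEnd token then (st.1 ++ [this], ([] : List String)) else (st.1, this))
    (([] : List (List String)), ([] : List String))).1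

-- ===== PORT B =====
def title_from_tokens_alt (tokens : List (List (String × String))) : List (List String) :=
  let bounds : List Int :=
    ((PySem.List.enumerate tokens 0).filter (fun p => isEnd p.2)).map (fun p => p.1)
  (bounds.foldl
    (fun (st : List (List String) × Int) (b : Int) =>
      (st.1 ++ [(PySem.List.slice tokens (some st.2) (some (b + 1))).filterMap
                  (fun t => if isTitle t then some (tokText t) else none)], b + 1))
    (([] : List (List String)), (0 : Int))).1

-- ===== PRECONDITION & SPEC =====
-- Pre_ excludes exactly the inputs where A raises KeyError: a token without a 'class' key,
-- or a token whose class contains 'title' but which has no 'text' key.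
def Pre_title_from_tokens (tokens : List (List (String × String))) : Prop :=
  ∀ t ∈ tokens, (PySem.Dict.mk t).contains "class" = true ∧
    (isTitle t = true → (PySem.Dict.mk t).contains "text" = true)
instance (tokens : List (List (String × String))) : Decidable (Pre_title_from_tokens tokens) := by unfold Pre_title_from_tokens; infer_instance
def pvWitness_title_from_tokens : (List (List (String × String))) :=
  [[("class", "b-title"), ("text", "Deep")], [("class", "title e-title"), ("text", "Sea")], [("class", "other")]]

def Spec_title_from_tokens (tokens : List (List (String × String))) (out : List (List String)) : Prop := out = title_from_tokens_alt tokens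
instance (tokens : List (List (String × String))) (out : List (List String)) : Decidable (Spec_title_from_tokens tokens out) := by unfold Spec_title_from_tokens; infer_instance

-- ===== CLAIM (what is proved, stated in full; the proofs are below) =====
def Claim_equal_title_from_tokens : Prop := ∀ (tokens : List (List (String × String))), Dom_title_from_tokens tokens → Pre_title_from_tokens tokens → Spec_title_from_tokens tokens (title_from_tokens tokens)

-- ===== LEMMAS AND PROOFS =====

-- the title texts of a run of tokens (B's comprehension)
def collect (ts : List (List (String × String))) : List String :=
  ts.filterMap (fun t => if isTitle t then some (tokText t) else none)

-- recursive characterisation of the segmentation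
def groups (this : List String) : List (List (String × String)) → List (List String)
  | [] => []
  | t :: ts =>
      if isEnd t then (if isTitle t then this ++ [tokText t] else this) :: groups [] ts
      else groups (if isTitle t then this ++ [tokText t] else this) ts

def stepB (tokens : List (List (String × String))) (st : List (List String) × Int) (b : Int) :
    List (List String) × Int :=
  (st.1 ++ [collect (PySem.List.slice tokens (some st.2) (some (b + 1)))], b + 1)

def boundsFrom (s : Int) (ts : List (List (String × String))) : List Int :=
  ((PySem.List.enumerate ts s).filter (fun p => isEnd p.2)).map (fun p => p.1)

lemma boundsFrom_nil (s : Int) : boundsFrom s [] = [] := rfl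

lemma boundsFrom_cons (s : Int) (t : List (String × String)) (ts : List (List (String × String))) :
    boundsFrom s (t :: ts) = if isEnd t then s :: boundsFrom (s + 1) ts else boundsFrom (s + 1) ts := by
  simp only [boundsFrom, PySem.List.enumerate_cons, List.filter_cons]
  by_cases h : isEnd t <;> simp [h]

lemma collect_append (xs : List (List (String × String))) (t : List (String × String)) :
    collect (xs ++ [t]) = collect xs ++ (if isTitle t then [tokText t] else []) := by
  simp only [collect, List.filterMap_append]
  by_cases h : isTitle t <;> simp [h]

lemma foldA_eq_groups (ts : List (List (String × String)))
    (acc : List (List String)) (this : List String) :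
    (ts.foldl
      (fun (st : List (List String) × List String) token =>
        let this := if isTitle token then st.2 ++ [tokText token] else st.2
        if isEnd token then (st.1 ++ [this], ([] : List String)) else (st.1, this))
      (acc, this)).1 = acc ++ groups this ts := by
  induction ts generalizing acc this with
  | nil => simp [groups]
  | cons t ts ih =>
      simp only [List.foldl_cons, groups]
      by_cases h : isEnd t <;> simp [h, ih]

lemma slice_chunk (done cur ts : List (List (String × String))) (t : List (String × String)) :
    PySem.List.slice (done ++ (cur ++ t :: ts)) (some ((done.length : Nat) : Int))
      (some (((done.length + cur.length : Nat) : Int) + 1)) = cur ++ [t] := by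
  have h1 : (((done.length + cur.length : Nat) : Int) + 1) = (((done.length + cur.length + 1 : Nat)) : Int) := by
    push_cast; ring
  rw [h1, PySem.List.slice_natCast]
  have h2 : done ++ (cur ++ t :: ts) = done ++ ((cur ++ [t]) ++ ts) := by simp
  rw [h2, List.drop_left]
  have h3 : done.length + cur.length + 1 - done.length = (cur ++ [t]).length := by
    simp; omega
  rw [h3, List.take_left]

lemma foldB_eq_groups (ts : List (List (String × String))) :
    ∀ (done cur : List (List (String × String))) (acc : List (List String)),
    ((boundsFrom ((done.length + cur.length : Nat) : Int) ts).foldl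
        (stepB (done ++ (cur ++ ts))) (acc, ((done.length : Nat) : Int))).1
      = acc ++ groups (collect cur) ts := by
  induction ts with
  | nil => intro done cur acc; simp [boundsFrom_nil, groups]
  | cons t ts ih =>
      intro done cur acc
      rw [boundsFrom_cons]
      by_cases h : isEnd t
      · simp only [h, if_true, List.foldl_cons, stepB,
          slice_chunk done cur ts t]
        have key := ih (done ++ cur ++ [t]) [] (acc ++ [collect (cur ++ [t])])
        simp only [List.nil_append, List.length_append, List.length_cons,
          List.length_nil, Nat.add_zero, List.append_assoc, collect] at key ⊢
        push_cast at key ⊢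
        rw [← add_assoc, List.singleton_append] at key
        rw [key]
        simp only [groups, h, if_true, List.singleton_append]
        congr 1
        by_cases ht : isTitle t <;> simp [ht]
      · simp only [h, if_false, Bool.false_eq_true]
        have key := ih done (cur ++ [t]) acc
        simp only [List.length_append, List.length_cons, List.length_nil,
          List.append_assoc, List.cons_append, List.nil_append] at key ⊢
        push_cast at key ⊢
        rw [← add_assoc] at key
        rw [key]
        simp only [groups, h, if_false, Bool.false_eq_true]
        congr 2
        by_cases ht : isTitle t <;> simp [ht, collect_append]

lemma altStep_eq (tokens : List (List (String × String))) :
    (fun (st : List (List String) × Int) (b : Int) =>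
      (st.1 ++ [(PySem.List.slice tokens (some st.2) (some (b + 1))).filterMap
                  (fun t => if isTitle t then some (tokText t) else none)], b + 1)) = stepB tokens := by
  funext st b; simp [stepB, collect]

lemma alt_eq_groups (tokens : List (List (String × String))) :
    title_from_tokens_alt tokens = groups [] tokens := by
  unfold title_from_tokens_alt
  rw [altStep_eq]
  have h := foldB_eq_groups tokens [] [] []
  simpa [boundsFrom, collect] using h

-- ===== VERDICT (by name: the statement is the Claim_ definition above) =====
theorem title_from_tokens_spec : Claim_equal_title_from_tokens := by
  intro tokens _ _
  unfold Spec_title_from_tokens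
  rw [alt_eq_groups]
  unfold title_from_tokens
  rw [foldA_eq_groups tokens [] []]
  simp
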